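-- pv_equiv track=rewrite | github.com/witkowskipiotr/Checkio | oreilly/ghost_age.py | ghost_age
-- ===== SOURCE A (Python) =====
-- def fibonaci_generator(number: int):
--     """
--     Slave generator - called in function:
--         - ghost_age
--     In mathematics, the Fibonacci numbers are the numbers in the following integer sequence,
--     called the Fibonacci sequence, and characterized by the fact that every number after
--     the first two is the sum of the two preceding ones.
--     Defined:
--         F(n)=F(n-1)+F(n-2)
--     Example:
--         number = 0
--         value: 0, 1, 1, 2, 3, 5, 8, 13, 21, 34, 55, 89, 144, ...
--         F(0) = 0, F(2) = 1, F(7) = 13, F(9) = 34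
--         fibonaci_generator = fibonaci(0)
--         number = next(fibonaci_generator) -> number = 0
--     Args:
--         number: The first element of the list of int
--     Return:
--         Next value of fibonacci sequence (int)
--     """
--     first, second = number, number + 1
--     while True:
--         yield first
--         first, second = second, first + second
--
-- def ghost_age(opaque: int) -> bool:
--     """
--     Main function
--     The function checks the age of the ghosts. Age is associated with opaque.
--      The new spirit has a opaque of 10000 on a scale of 0 to 10000.
--      Opaque is related to age, in every year of life the spirit of his opaque:
--      if a given year is a number of fibonacci, we subtract opacity by the amount of this year
--      if it is not a number of fibonacci its opaque increases by 1.
--     example: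
--         opaque = 9990
--         A newborn ghost -- 10000 units of opacity.
--         1 year -- 10000 - 1 = 9999 (1 is a Fibonacci number).
--         2 year -- 9999 - 2 = 9997 (2 is a Fibonacci number).
--         3 year -- 9997 - 3 = 9994 (3 is a Fibonacci number).
--         4 year -- 9994 + 1 = 9995 (4 is not a Fibonacci number).
--         5 year -- 9995 - 5 = 9990 (5 is a Fibonacci number).
--         return 5
--     Args:
--         opaque: An opacity measurement as an integer
--     return:
--         The age of the ghost as an integer
--     """
--     fibonaci = fibonaci_generator(number=1)
--     age_ghost = 0
--     opaque_actual = 10000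
--     is_fib = True
--     while True:
--         if age_ghost > 5000:
--             # if ghost_age is more than 5000 return
--             return None
--         if opaque == opaque_actual:
--             return age_ghost
--         age_ghost += 1
--         if is_fib:
--             fib = next(fibonaci)
--         if age_ghost == fib:
--             opaque_actual -= fib
--             is_fib = True
--         elif age_ghost != fib:
--             opaque_actual += 1
--             is_fib = False
-- ===== SOURCE B (Python) =====
-- def ghost_age(opaque: int) -> bool:
--     # Walk fib-year segments arithmetically instead of simulating every year.
--     if opaque == 10000:
--         return 0
--     fibs = []
--     a, b = 1, 2
--     while a <= 5000:
--         fibs.append(a)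
--         a, b = b, a + b
--     age, op = 0, 10000
--     for f in fibs:
--         gap = f - age - 1
--         if gap > 0 and op < opaque <= op + gap:
--             return age + (opaque - op)
--         op = op + gap - f
--         age = f
--         if opaque == op:
--             return age
--     gap = 5000 - age
--     if gap > 0 and op < opaque <= op + gap:
--         return age + (opaque - op)
--     return None
-- ===== Notes on version B (the rewrite author's own statement) =====
-- stated objective: faster
-- what changed: B replaces A's year-by-year simulation of all 5000 ages with a walk over the 18 Fibonacci years only, deciding membership in each strictly-increasing non-fib run by arithmetic on its start opacity and length.
import Mathlib
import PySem

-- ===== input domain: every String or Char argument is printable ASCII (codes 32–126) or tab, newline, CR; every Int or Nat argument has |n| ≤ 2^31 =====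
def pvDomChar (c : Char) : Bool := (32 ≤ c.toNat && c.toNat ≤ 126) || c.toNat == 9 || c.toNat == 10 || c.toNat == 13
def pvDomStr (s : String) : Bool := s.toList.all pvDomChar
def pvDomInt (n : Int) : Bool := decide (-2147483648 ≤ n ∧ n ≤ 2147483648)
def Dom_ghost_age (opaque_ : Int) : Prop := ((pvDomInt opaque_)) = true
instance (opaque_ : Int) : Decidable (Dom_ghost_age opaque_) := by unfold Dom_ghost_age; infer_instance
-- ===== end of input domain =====

-- B replaces A's year-by-year simulation with arithmetic over fib-year segments (objective: faster).

-- ===== PORT A =====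
-- A's while-True loop; the generator state (first, second) is the pair gen, fib the cached value.
-- The dite guard `age > 5000` is Python's own exit test; it also bounds the recursion.
def ghostLoop (opaque_ age op : Int) (isFib : Bool) (fib : Int) (gen : Int × Int) : Option Int :=
  if _h : age > 5000 then none
  else if opaque_ = op then some age
  else
    let age' := age + 1
    let fib' := if isFib then gen.1 else fib
    let gen' := if isFib then (gen.2, gen.1 + gen.2) else gen
    if age' = fib' then ghostLoop opaque_ age' (op - fib') true fib' gen'
    else ghostLoop opaque_ age' (op + 1) false fib' gen'
termination_by (5001 - age).toNat
decreasing_by all_goals omega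

def ghost_age (opaque_ : Int) : Option Int :=
  ghostLoop opaque_ 0 10000 true 0 (1, 2)

-- ===== PORT B =====
-- Source B's fib-building while loop; the guard's `a < b` conjunct only makes the recursion total
-- (it always holds on the reachable states starting from (1, 2)).
def fibsUpTo (a b : Int) : List Int :=
  if _h : a ≤ 5000 ∧ a < b then a :: fibsUpTo b (a + b) else []
termination_by (5001 - a).toNat
decreasing_by omega

-- Source B's for-loop over the fib list, with early returns.
def runFibs (opaque_ : Int) : List Int → Int → Int → Option Int
  | [], age, op =>
    let gap := 5000 - age
    if gap > 0 ∧ op < opaque_ ∧ opaque_ ≤ op + gap then some (age + (opaque_ - op)) else none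
  | f :: rest, age, op =>
    let gap := f - age - 1
    if gap > 0 ∧ op < opaque_ ∧ opaque_ ≤ op + gap then some (age + (opaque_ - op))
    else
      let op' := op + gap - f
      if opaque_ = op' then some f else runFibs opaque_ rest f op'

def ghost_age_alt (opaque_ : Int) : Option Int :=
  if opaque_ = 10000 then some 0
  else runFibs opaque_ (fibsUpTo 1 2) 0 10000

-- ===== PRECONDITION & SPEC =====
def Spec_ghost_age (opaque_ : Int) (out : Option Int) : Prop := out = ghost_age_alt opaque_
instance (opaque_ : Int) (out : Option Int) : Decidable (Spec_ghost_age opaque_ out) := by unfold Spec_ghost_age; infer_instance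

-- ===== CLAIM (what is proved, stated in full; the proofs are below) =====
def Claim_equal_ghost_age : Prop := ∀ (opaque_ : Int), Dom_ghost_age opaque_ → Spec_ghost_age opaque_ (ghost_age opaque_)

-- ===== LEMMAS AND PROOFS =====

-- A run of non-fib years in A's loop (is_fib = false, next fib g1 still ahead, g1 ≤ 5001):
-- opacity climbs by 1 per year until age g1, where g1 is subtracted.
theorem L1 (opaque_ g1 g2 h2 : Int) (hg : g1 ≤ 5001) :
    ∀ n : Nat, ∀ a o : Int, (g1 - a).toNat ≤ n → a < g1 →
      ghostLoop opaque_ a o false g1 (g2, h2) =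
        (if opaque_ = o then some a
         else if o < opaque_ ∧ opaque_ ≤ o + (g1 - a - 1) then some (a + (opaque_ - o))
         else ghostLoop opaque_ g1 (o + (g1 - a - 1) - g1) true g1 (g2, h2)) := by
  intro n
  induction n with
  | zero => intro a o hb ha; omega
  | succ n ih =>
    intro a o hb ha
    rw [ghostLoop]
    rw [dif_neg (by omega : ¬ a > 5000)]
    by_cases ho : opaque_ = o
    · simp [ho]
    · rw [if_neg ho, if_neg ho]
      simp only [Bool.false_eq_true, if_false]
      by_cases he : a + 1 = g1
      · rw [if_pos he]
        rw [if_neg (by omega : ¬ (o < opaque_ ∧ opaque_ ≤ o + (g1 - a - 1)))]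
        have : o - g1 = o + (g1 - a - 1) - g1 := by omega
        rw [he, this]
      · rw [if_neg he]
        rw [ih (a+1) (o+1) (by omega) (by omega)]
        have : o + 1 + (g1 - (a+1) - 1) - g1 = o + (g1 - a - 1) - g1 := by omega
        rw [this]
        by_cases hm : o < opaque_ ∧ opaque_ ≤ o + (g1 - a - 1)
        · rw [if_pos hm]
          by_cases h1 : opaque_ = o + 1
          · rw [if_pos h1]
            simp only [Option.some.injEq]; omega
          · rw [if_neg h1, if_pos (by omega : o + 1 < opaque_ ∧ opaque_ ≤ o + 1 + (g1 - (a + 1) - 1))]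
            simp only [Option.some.injEq]; omega
        · rw [if_neg hm, if_neg (by omega : ¬ opaque_ = o + 1),
              if_neg (by omega : ¬ (o + 1 < opaque_ ∧ opaque_ ≤ o + 1 + (g1 - (a + 1) - 1)))]

-- One whole segment of A's loop from a state just after a fib year (is_fib = true,
-- generator about to yield g1 > current age, g1 ≤ 5001).
theorem L2 (opaque_ a o f g1 g2 : Int) (h1 : a < g1) (h2 : g1 ≤ 5001) :
    ghostLoop opaque_ a o true f (g1, g2) =
      (if opaque_ = o then some a
       else if o < opaque_ ∧ opaque_ ≤ o + (g1 - a - 1) then some (a + (opaque_ - o))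
       else ghostLoop opaque_ g1 (o + (g1 - a - 1) - g1) true g1 (g2, g1 + g2)) := by
  rw [ghostLoop]
  rw [dif_neg (by omega : ¬ a > 5000)]
  by_cases ho : opaque_ = o
  · simp [ho]
  · rw [if_neg ho, if_neg ho]
    simp only [if_true]
    by_cases he : a + 1 = g1
    · rw [if_pos he]
      rw [if_neg (by omega : ¬ (o < opaque_ ∧ opaque_ ≤ o + (g1 - a - 1)))]
      have : o - g1 = o + (g1 - a - 1) - g1 := by omega
      rw [he, this]
    · rw [if_neg he]
      rw [L1 opaque_ g1 g2 (g1 + g2) h2 ((g1 - (a+1)).toNat) (a+1) (o+1) le_rfl (by omega)]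
      have : o + 1 + (g1 - (a+1) - 1) - g1 = o + (g1 - a - 1) - g1 := by omega
      rw [this]
      by_cases hm : o < opaque_ ∧ opaque_ ≤ o + (g1 - a - 1)
      · rw [if_pos hm]
        by_cases hq : opaque_ = o + 1
        · rw [if_pos hq]
          simp only [Option.some.injEq]; omega
        · rw [if_neg hq, if_pos (by omega : o + 1 < opaque_ ∧ opaque_ ≤ o + 1 + (g1 - (a + 1) - 1))]
          simp only [Option.some.injEq]; omega
      · rw [if_neg hm, if_neg (by omega : ¬ opaque_ = o + 1),
            if_neg (by omega : ¬ (o + 1 < opaque_ ∧ opaque_ ≤ o + 1 + (g1 - (a + 1) - 1)))]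

-- Tail run: is_fib = false and the next fib g1 is beyond 5001, so opacity climbs by 1
-- per year until the age-5000 cutoff and the loop then returns none.
theorem L3 (opaque_ g1 g2 h2 : Int) (hg : 5001 < g1) :
    ∀ n : Nat, ∀ a o : Int, (5001 - a).toNat ≤ n → a ≤ 5001 →
      ghostLoop opaque_ a o false g1 (g2, h2) =
        (if o ≤ opaque_ ∧ opaque_ ≤ o + (5000 - a) then some (a + (opaque_ - o)) else none) := by
  intro n
  induction n with
  | zero =>
    intro a o hb ha
    rw [ghostLoop, dif_pos (by omega : a > 5000),
        if_neg (by omega : ¬ (o ≤ opaque_ ∧ opaque_ ≤ o + (5000 - a)))]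
  | succ n ih =>
    intro a o hb ha
    by_cases hA : a > 5000
    · rw [ghostLoop, dif_pos hA,
          if_neg (by omega : ¬ (o ≤ opaque_ ∧ opaque_ ≤ o + (5000 - a)))]
    · rw [ghostLoop, dif_neg hA]
      by_cases ho : opaque_ = o
      · rw [if_pos ho, if_pos (by omega : o ≤ opaque_ ∧ opaque_ ≤ o + (5000 - a))]
        simp only [Option.some.injEq]; omega
      · rw [if_neg ho]
        simp only [Bool.false_eq_true, if_false]
        rw [if_neg (by omega : ¬ a + 1 = g1)]
        rw [ih (a+1) (o+1) (by omega) (by omega)]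
        by_cases hm : o ≤ opaque_ ∧ opaque_ ≤ o + (5000 - a)
        · rw [if_pos hm, if_pos (by omega : o + 1 ≤ opaque_ ∧ opaque_ ≤ o + 1 + (5000 - (a + 1)))]
          simp only [Option.some.injEq]; omega
        · rw [if_neg hm,
              if_neg (by omega : ¬ (o + 1 ≤ opaque_ ∧ opaque_ ≤ o + 1 + (5000 - (a + 1))))]

-- Final segment: from age 4181 (the last fib ≤ 5000) the generator yields 6765,
-- which no age ≤ 5001 ever equals, so opacity climbs by 1 per year up to age 5000.
theorem L4 (opaque_ o f g2 : Int) :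
    ghostLoop opaque_ 4181 o true f (6765, g2) =
      (if opaque_ = o then some 4181
       else if o < opaque_ ∧ opaque_ ≤ o + 819 then some (4181 + (opaque_ - o)) else none) := by
  rw [ghostLoop]
  rw [dif_neg (by norm_num : ¬ (4181:Int) > 5000)]
  by_cases ho : opaque_ = o
  · simp [ho]
  · rw [if_neg ho, if_neg ho]
    simp only [if_true]
    rw [if_neg (by norm_num : ¬ (4181:Int) + 1 = 6765)]
    rw [L3 opaque_ 6765 g2 (6765 + g2) (by norm_num) (819 : Nat) (4181+1) (o+1)
        le_rfl (by norm_num)]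
    by_cases hm : o < opaque_ ∧ opaque_ ≤ o + 819
    · rw [if_pos (by omega : o + 1 ≤ opaque_ ∧ opaque_ ≤ o + 1 + (5000 - (4181 + 1))),
          if_pos hm]
      simp only [Option.some.injEq]; omega
    · rw [if_neg (by omega : ¬ (o + 1 ≤ opaque_ ∧ opaque_ ≤ o + 1 + (5000 - (4181 + 1)))),
          if_neg hm]

-- ===== VERDICT helper proofs =====
theorem fibs_eq : fibsUpTo 1 2 = [1, 2, 3, 5, 8, 13, 21, 34, 55, 89, 144, 233, 377, 610, 987, 1597, 2584, 4181] := by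
  rw [fibsUpTo, dif_pos (by norm_num)]
  rw [fibsUpTo, dif_pos (by norm_num)]
  rw [fibsUpTo, dif_pos (by norm_num)]
  rw [fibsUpTo, dif_pos (by norm_num)]
  rw [fibsUpTo, dif_pos (by norm_num)]
  rw [fibsUpTo, dif_pos (by norm_num)]
  rw [fibsUpTo, dif_pos (by norm_num)]
  rw [fibsUpTo, dif_pos (by norm_num)]
  rw [fibsUpTo, dif_pos (by norm_num)]
  rw [fibsUpTo, dif_pos (by norm_num)]
  rw [fibsUpTo, dif_pos (by norm_num)]
  rw [fibsUpTo, dif_pos (by norm_num)]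
  rw [fibsUpTo, dif_pos (by norm_num)]
  rw [fibsUpTo, dif_pos (by norm_num)]
  rw [fibsUpTo, dif_pos (by norm_num)]
  rw [fibsUpTo, dif_pos (by norm_num)]
  rw [fibsUpTo, dif_pos (by norm_num)]
  rw [fibsUpTo, dif_pos (by norm_num)]
  rw [fibsUpTo, dif_neg (by norm_num)]
  norm_num

set_option maxHeartbeats 2000000 in
theorem ghost_age_eq (opaque_ : Int) : ghost_age opaque_ = ghost_age_alt opaque_ := by
  unfold ghost_age ghost_age_alt
  rw [fibs_eq]
  have s0 : ghostLoop opaque_ 0 10000 true 0 (1, 2) = (if opaque_ = 10000 then some (0:Int) else if 10000 < opaque_ ∧ opaque_ ≤ 10000 then some (0 + (opaque_ - 10000)) else ghostLoop opaque_ 1 9999 true 1 (2, 3)) := by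
    rw [L2 opaque_ 0 10000 0 1 2 (by norm_num) (by norm_num)]
    norm_num
  have s1 : ghostLoop opaque_ 1 9999 true 1 (2, 3) = (if opaque_ = 9999 then some (1:Int) else if 9999 < opaque_ ∧ opaque_ ≤ 9999 then some (1 + (opaque_ - 9999)) else ghostLoop opaque_ 2 9997 true 2 (3, 5)) := by
    rw [L2 opaque_ 1 9999 1 2 3 (by norm_num) (by norm_num)]
    norm_num
  have s2 : ghostLoop opaque_ 2 9997 true 2 (3, 5) = (if opaque_ = 9997 then some (2:Int) else if 9997 < opaque_ ∧ opaque_ ≤ 9997 then some (2 + (opaque_ - 9997)) else ghostLoop opaque_ 3 9994 true 3 (5, 8)) := by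
    rw [L2 opaque_ 2 9997 2 3 5 (by norm_num) (by norm_num)]
    norm_num
  have s3 : ghostLoop opaque_ 3 9994 true 3 (5, 8) = (if opaque_ = 9994 then some (3:Int) else if 9994 < opaque_ ∧ opaque_ ≤ 9995 then some (3 + (opaque_ - 9994)) else ghostLoop opaque_ 5 9990 true 5 (8, 13)) := by
    rw [L2 opaque_ 3 9994 3 5 8 (by norm_num) (by norm_num)]
    norm_num
  have s4 : ghostLoop opaque_ 5 9990 true 5 (8, 13) = (if opaque_ = 9990 then some (5:Int) else if 9990 < opaque_ ∧ opaque_ ≤ 9992 then some (5 + (opaque_ - 9990)) else ghostLoop opaque_ 8 9984 true 8 (13, 21)) := by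
    rw [L2 opaque_ 5 9990 5 8 13 (by norm_num) (by norm_num)]
    norm_num
  have s5 : ghostLoop opaque_ 8 9984 true 8 (13, 21) = (if opaque_ = 9984 then some (8:Int) else if 9984 < opaque_ ∧ opaque_ ≤ 9988 then some (8 + (opaque_ - 9984)) else ghostLoop opaque_ 13 9975 true 13 (21, 34)) := by
    rw [L2 opaque_ 8 9984 8 13 21 (by norm_num) (by norm_num)]
    norm_num
  have s6 : ghostLoop opaque_ 13 9975 true 13 (21, 34) = (if opaque_ = 9975 then some (13:Int) else if 9975 < opaque_ ∧ opaque_ ≤ 9982 then some (13 + (opaque_ - 9975)) else ghostLoop opaque_ 21 9961 true 21 (34, 55)) := by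
    rw [L2 opaque_ 13 9975 13 21 34 (by norm_num) (by norm_num)]
    norm_num
  have s7 : ghostLoop opaque_ 21 9961 true 21 (34, 55) = (if opaque_ = 9961 then some (21:Int) else if 9961 < opaque_ ∧ opaque_ ≤ 9973 then some (21 + (opaque_ - 9961)) else ghostLoop opaque_ 34 9939 true 34 (55, 89)) := by
    rw [L2 opaque_ 21 9961 21 34 55 (by norm_num) (by norm_num)]
    norm_num
  have s8 : ghostLoop opaque_ 34 9939 true 34 (55, 89) = (if opaque_ = 9939 then some (34:Int) else if 9939 < opaque_ ∧ opaque_ ≤ 9959 then some (34 + (opaque_ - 9939)) else ghostLoop opaque_ 55 9904 true 55 (89, 144)) := by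
    rw [L2 opaque_ 34 9939 34 55 89 (by norm_num) (by norm_num)]
    norm_num
  have s9 : ghostLoop opaque_ 55 9904 true 55 (89, 144) = (if opaque_ = 9904 then some (55:Int) else if 9904 < opaque_ ∧ opaque_ ≤ 9937 then some (55 + (opaque_ - 9904)) else ghostLoop opaque_ 89 9848 true 89 (144, 233)) := by
    rw [L2 opaque_ 55 9904 55 89 144 (by norm_num) (by norm_num)]
    norm_num
  have s10 : ghostLoop opaque_ 89 9848 true 89 (144, 233) = (if opaque_ = 9848 then some (89:Int) else if 9848 < opaque_ ∧ opaque_ ≤ 9902 then some (89 + (opaque_ - 9848)) else ghostLoop opaque_ 144 9758 true 144 (233, 377)) := by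
    rw [L2 opaque_ 89 9848 89 144 233 (by norm_num) (by norm_num)]
    norm_num
  have s11 : ghostLoop opaque_ 144 9758 true 144 (233, 377) = (if opaque_ = 9758 then some (144:Int) else if 9758 < opaque_ ∧ opaque_ ≤ 9846 then some (144 + (opaque_ - 9758)) else ghostLoop opaque_ 233 9613 true 233 (377, 610)) := by
    rw [L2 opaque_ 144 9758 144 233 377 (by norm_num) (by norm_num)]
    norm_num
  have s12 : ghostLoop opaque_ 233 9613 true 233 (377, 610) = (if opaque_ = 9613 then some (233:Int) else if 9613 < opaque_ ∧ opaque_ ≤ 9756 then some (233 + (opaque_ - 9613)) else ghostLoop opaque_ 377 9379 true 377 (610, 987)) := by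
    rw [L2 opaque_ 233 9613 233 377 610 (by norm_num) (by norm_num)]
    norm_num
  have s13 : ghostLoop opaque_ 377 9379 true 377 (610, 987) = (if opaque_ = 9379 then some (377:Int) else if 9379 < opaque_ ∧ opaque_ ≤ 9611 then some (377 + (opaque_ - 9379)) else ghostLoop opaque_ 610 9001 true 610 (987, 1597)) := by
    rw [L2 opaque_ 377 9379 377 610 987 (by norm_num) (by norm_num)]
    norm_num
  have s14 : ghostLoop opaque_ 610 9001 true 610 (987, 1597) = (if opaque_ = 9001 then some (610:Int) else if 9001 < opaque_ ∧ opaque_ ≤ 9377 then some (610 + (opaque_ - 9001)) else ghostLoop opaque_ 987 8390 true 987 (1597, 2584)) := by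
    rw [L2 opaque_ 610 9001 610 987 1597 (by norm_num) (by norm_num)]
    norm_num
  have s15 : ghostLoop opaque_ 987 8390 true 987 (1597, 2584) = (if opaque_ = 8390 then some (987:Int) else if 8390 < opaque_ ∧ opaque_ ≤ 8999 then some (987 + (opaque_ - 8390)) else ghostLoop opaque_ 1597 7402 true 1597 (2584, 4181)) := by
    rw [L2 opaque_ 987 8390 987 1597 2584 (by norm_num) (by norm_num)]
    norm_num
  have s16 : ghostLoop opaque_ 1597 7402 true 1597 (2584, 4181) = (if opaque_ = 7402 then some (1597:Int) else if 7402 < opaque_ ∧ opaque_ ≤ 8388 then some (1597 + (opaque_ - 7402)) else ghostLoop opaque_ 2584 5804 true 2584 (4181, 6765)) := by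
    rw [L2 opaque_ 1597 7402 1597 2584 4181 (by norm_num) (by norm_num)]
    norm_num
  have s17 : ghostLoop opaque_ 2584 5804 true 2584 (4181, 6765) = (if opaque_ = 5804 then some (2584:Int) else if 5804 < opaque_ ∧ opaque_ ≤ 7400 then some (2584 + (opaque_ - 5804)) else ghostLoop opaque_ 4181 3219 true 4181 (6765, 10946)) := by
    rw [L2 opaque_ 2584 5804 2584 4181 6765 (by norm_num) (by norm_num)]
    norm_num
  have s18 : ghostLoop opaque_ 4181 3219 true 4181 (6765, 10946) =
      (if opaque_ = 3219 then some (4181:Int)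
       else if 3219 < opaque_ ∧ opaque_ ≤ 4038 then some (4181 + (opaque_ - 3219)) else none) := by
    rw [L4 opaque_ 3219 4181 10946]
    norm_num
  rw [s0, s1, s2, s3, s4, s5, s6, s7, s8, s9, s10, s11, s12, s13, s14, s15, s16, s17, s18]
  have b0 : runFibs opaque_ [1, 2, 3, 5, 8, 13, 21, 34, 55, 89, 144, 233, 377, 610, 987, 1597, 2584, 4181] 0 10000 = (if opaque_ = 9999 then some (1:Int) else runFibs opaque_ [2, 3, 5, 8, 13, 21, 34, 55, 89, 144, 233, 377, 610, 987, 1597, 2584, 4181] 1 9999) := by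
    rw [runFibs]
    norm_num
  have b1 : runFibs opaque_ [2, 3, 5, 8, 13, 21, 34, 55, 89, 144, 233, 377, 610, 987, 1597, 2584, 4181] 1 9999 = (if opaque_ = 9997 then some (2:Int) else runFibs opaque_ [3, 5, 8, 13, 21, 34, 55, 89, 144, 233, 377, 610, 987, 1597, 2584, 4181] 2 9997) := by
    rw [runFibs]
    norm_num
  have b2 : runFibs opaque_ [3, 5, 8, 13, 21, 34, 55, 89, 144, 233, 377, 610, 987, 1597, 2584, 4181] 2 9997 = (if opaque_ = 9994 then some (3:Int) else runFibs opaque_ [5, 8, 13, 21, 34, 55, 89, 144, 233, 377, 610, 987, 1597, 2584, 4181] 3 9994) := by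
    rw [runFibs]
    norm_num
  have b3 : runFibs opaque_ [5, 8, 13, 21, 34, 55, 89, 144, 233, 377, 610, 987, 1597, 2584, 4181] 3 9994 = (if 9994 < opaque_ ∧ opaque_ ≤ 9995 then some (3 + (opaque_ - 9994)) else if opaque_ = 9990 then some (5:Int) else runFibs opaque_ [8, 13, 21, 34, 55, 89, 144, 233, 377, 610, 987, 1597, 2584, 4181] 5 9990) := by
    rw [runFibs]
    norm_num
  have b4 : runFibs opaque_ [8, 13, 21, 34, 55, 89, 144, 233, 377, 610, 987, 1597, 2584, 4181] 5 9990 = (if 9990 < opaque_ ∧ opaque_ ≤ 9992 then some (5 + (opaque_ - 9990)) else if opaque_ = 9984 then some (8:Int) else runFibs opaque_ [13, 21, 34, 55, 89, 144, 233, 377, 610, 987, 1597, 2584, 4181] 8 9984) := by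
    rw [runFibs]
    norm_num
  have b5 : runFibs opaque_ [13, 21, 34, 55, 89, 144, 233, 377, 610, 987, 1597, 2584, 4181] 8 9984 = (if 9984 < opaque_ ∧ opaque_ ≤ 9988 then some (8 + (opaque_ - 9984)) else if opaque_ = 9975 then some (13:Int) else runFibs opaque_ [21, 34, 55, 89, 144, 233, 377, 610, 987, 1597, 2584, 4181] 13 9975) := by
    rw [runFibs]
    norm_num
  have b6 : runFibs opaque_ [21, 34, 55, 89, 144, 233, 377, 610, 987, 1597, 2584, 4181] 13 9975 = (if 9975 < opaque_ ∧ opaque_ ≤ 9982 then some (13 + (opaque_ - 9975)) else if opaque_ = 9961 then some (21:Int) else runFibs opaque_ [34, 55, 89, 144, 233, 377, 610, 987, 1597, 2584, 4181] 21 9961) := by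
    rw [runFibs]
    norm_num
  have b7 : runFibs opaque_ [34, 55, 89, 144, 233, 377, 610, 987, 1597, 2584, 4181] 21 9961 = (if 9961 < opaque_ ∧ opaque_ ≤ 9973 then some (21 + (opaque_ - 9961)) else if opaque_ = 9939 then some (34:Int) else runFibs opaque_ [55, 89, 144, 233, 377, 610, 987, 1597, 2584, 4181] 34 9939) := by
    rw [runFibs]
    norm_num
  have b8 : runFibs opaque_ [55, 89, 144, 233, 377, 610, 987, 1597, 2584, 4181] 34 9939 = (if 9939 < opaque_ ∧ opaque_ ≤ 9959 then some (34 + (opaque_ - 9939)) else if opaque_ = 9904 then some (55:Int) else runFibs opaque_ [89, 144, 233, 377, 610, 987, 1597, 2584, 4181] 55 9904) := by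
    rw [runFibs]
    norm_num
  have b9 : runFibs opaque_ [89, 144, 233, 377, 610, 987, 1597, 2584, 4181] 55 9904 = (if 9904 < opaque_ ∧ opaque_ ≤ 9937 then some (55 + (opaque_ - 9904)) else if opaque_ = 9848 then some (89:Int) else runFibs opaque_ [144, 233, 377, 610, 987, 1597, 2584, 4181] 89 9848) := by
    rw [runFibs]
    norm_num
  have b10 : runFibs opaque_ [144, 233, 377, 610, 987, 1597, 2584, 4181] 89 9848 = (if 9848 < opaque_ ∧ opaque_ ≤ 9902 then some (89 + (opaque_ - 9848)) else if opaque_ = 9758 then some (144:Int) else runFibs opaque_ [233, 377, 610, 987, 1597, 2584, 4181] 144 9758) := by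
    rw [runFibs]
    norm_num
  have b11 : runFibs opaque_ [233, 377, 610, 987, 1597, 2584, 4181] 144 9758 = (if 9758 < opaque_ ∧ opaque_ ≤ 9846 then some (144 + (opaque_ - 9758)) else if opaque_ = 9613 then some (233:Int) else runFibs opaque_ [377, 610, 987, 1597, 2584, 4181] 233 9613) := by
    rw [runFibs]
    norm_num
  have b12 : runFibs opaque_ [377, 610, 987, 1597, 2584, 4181] 233 9613 = (if 9613 < opaque_ ∧ opaque_ ≤ 9756 then some (233 + (opaque_ - 9613)) else if opaque_ = 9379 then some (377:Int) else runFibs opaque_ [610, 987, 1597, 2584, 4181] 377 9379) := by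
    rw [runFibs]
    norm_num
  have b13 : runFibs opaque_ [610, 987, 1597, 2584, 4181] 377 9379 = (if 9379 < opaque_ ∧ opaque_ ≤ 9611 then some (377 + (opaque_ - 9379)) else if opaque_ = 9001 then some (610:Int) else runFibs opaque_ [987, 1597, 2584, 4181] 610 9001) := by
    rw [runFibs]
    norm_num
  have b14 : runFibs opaque_ [987, 1597, 2584, 4181] 610 9001 = (if 9001 < opaque_ ∧ opaque_ ≤ 9377 then some (610 + (opaque_ - 9001)) else if opaque_ = 8390 then some (987:Int) else runFibs opaque_ [1597, 2584, 4181] 987 8390) := by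
    rw [runFibs]
    norm_num
  have b15 : runFibs opaque_ [1597, 2584, 4181] 987 8390 = (if 8390 < opaque_ ∧ opaque_ ≤ 8999 then some (987 + (opaque_ - 8390)) else if opaque_ = 7402 then some (1597:Int) else runFibs opaque_ [2584, 4181] 1597 7402) := by
    rw [runFibs]
    norm_num
  have b16 : runFibs opaque_ [2584, 4181] 1597 7402 = (if 7402 < opaque_ ∧ opaque_ ≤ 8388 then some (1597 + (opaque_ - 7402)) else if opaque_ = 5804 then some (2584:Int) else runFibs opaque_ [4181] 2584 5804) := by
    rw [runFibs]
    norm_num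
  have b17 : runFibs opaque_ [4181] 2584 5804 =
      (if 5804 < opaque_ ∧ opaque_ ≤ 7400 then some (2584 + (opaque_ - 5804))
       else if opaque_ = 3219 then some (4181:Int)
       else if 3219 < opaque_ ∧ opaque_ ≤ 4038 then some (4181 + (opaque_ - 3219)) else none) := by
    simp only [runFibs]
    norm_num
  rw [b0, b1, b2, b3, b4, b5, b6, b7, b8, b9, b10, b11, b12, b13, b14, b15, b16, b17]
  rw [if_neg (by omega : ¬ (10000 < opaque_ ∧ opaque_ ≤ 10000)),
      if_neg (by omega : ¬ (9999 < opaque_ ∧ opaque_ ≤ 9999)),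
      if_neg (by omega : ¬ (9997 < opaque_ ∧ opaque_ ≤ 9997))]

-- ===== VERDICT (by name: the statement is the Claim_ definition above) =====
theorem ghost_age_spec : Claim_equal_ghost_age := by
  intro opaque_ _
  unfold Spec_ghost_age
  exact ghost_age_eq opaque_
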